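-- pv_equiv track=rewrite | github.com/maprajapati31/sentiment-analysis | spark-job/spark_category_job2.py | classify_post
-- ===== SOURCE A (Python) =====
-- def classify_post(content, hashtags):
--     text = (content or "").lower()
--     tags = " ".join(hashtags or []).lower()
--
--     if any(word in text + tags for word in ["travel", "trip", "explore", "vacation", "tokyo", "paris"]):
--         return "Travel"
--     elif any(word in text + tags for word in ["food", "restaurant", "cuisine", "taste", "meal"]):
--         return "Food"
--     elif any(word in text + tags for word in ["tech", "ai", "machine learning", "data", "software"]):
--         return "Technology"
--     elif any(word in text + tags for word in ["fitness", "workout", "gym", "health", "running"]):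
--         return "Health & Fitness"
--     elif any(word in text + tags for word in ["music", "movie", "art", "concert"]):
--         return "Entertainment"
--     else:
--         return "General"
-- ===== SOURCE B (Python) =====
-- # Position-scan with a first-character index: instead of asking, category by
-- # category, whether any keyword is a substring, walk every position of the
-- # combined lowered text once; a dict keyed by first character lists the only
-- # (keyword, rank) candidates that can start there, and a running minimum keeps
-- # the best (smallest) rank seen.  NAMES[best] is the answer.
--
-- KEYWORD_RANK = [
--     ("travel", 0), ("trip", 0), ("explore", 0), ("vacation", 0), ("tokyo", 0), ("paris", 0),
--     ("food", 1), ("restaurant", 1), ("cuisine", 1), ("taste", 1), ("meal", 1),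
--     ("tech", 2), ("ai", 2), ("machine learning", 2), ("data", 2), ("software", 2),
--     ("fitness", 3), ("workout", 3), ("gym", 3), ("health", 3), ("running", 3),
--     ("music", 4), ("movie", 4), ("art", 4), ("concert", 4),
-- ]
-- NAMES = ["Travel", "Food", "Technology", "Health & Fitness", "Entertainment", "General"]
--
-- FIRST = {}
-- for _kw, _rank in KEYWORD_RANK:
--     FIRST.setdefault(_kw[0], []).append((_kw, _rank))
--
-- def classify_post(content, hashtags):
--     h = (content or "").lower() + " ".join(hashtags or []).lower()
--     best = 5
--     for i in range(len(h)):
--         if best == 0: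
--             break
--         for kw, rank in FIRST.get(h[i], ()):
--             if rank < best and h.startswith(kw, i):
--                 best = rank
--     return NAMES[best]
-- ===== Notes on version B (the rewrite author's own statement) =====
-- stated objective: alternative
-- what changed: Instead of A's five per-category 'any(word in text+tags)' substring tests, B builds a dict indexing the flattened (keyword, rank) table by first character and makes one scan over the positions of the lowered haystack, keeping the minimum rank whose keyword starts at the current position (with an early stop once rank 0 is found); the answer is NAMES[best].
import Mathlib
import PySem

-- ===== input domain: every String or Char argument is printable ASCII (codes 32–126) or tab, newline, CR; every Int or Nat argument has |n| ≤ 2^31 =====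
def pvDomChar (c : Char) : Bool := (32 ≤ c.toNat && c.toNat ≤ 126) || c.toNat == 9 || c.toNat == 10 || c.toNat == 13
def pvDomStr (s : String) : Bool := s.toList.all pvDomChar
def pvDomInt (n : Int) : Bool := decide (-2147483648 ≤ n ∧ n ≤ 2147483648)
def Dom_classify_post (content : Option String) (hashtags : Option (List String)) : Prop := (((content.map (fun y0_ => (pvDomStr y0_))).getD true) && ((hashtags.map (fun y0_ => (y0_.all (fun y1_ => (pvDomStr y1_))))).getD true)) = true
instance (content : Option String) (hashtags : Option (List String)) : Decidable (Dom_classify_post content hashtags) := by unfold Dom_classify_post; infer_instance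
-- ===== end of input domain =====

-- B replaces A's per-category substring tests by a single position scan of the
-- combined lowered text, with a dict indexing the (keyword, rank) table by first
-- character and a running minimum rank (objective: alternative algorithm).

-- ===== PORT A =====
-- A, transliterated: text and tags lowered, then five branches, each testing
-- 'any(word in text + tags for word in [...])'; strings as List Char via PySem.Chars (exact).
def classify_post (content : Option String) (hashtags : Option (List String)) : String :=
  let text := PySem.Chars.lower (content.getD "").toList
  let tags := PySem.Chars.lower (PySem.Str.join " " (hashtags.getD [])).toList
  if (["travel", "trip", "explore", "vacation", "tokyo", "paris"] : List String).any
      (fun word => PySem.Chars.isIn word.toList (text ++ tags)) then "Travel"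
  else if (["food", "restaurant", "cuisine", "taste", "meal"] : List String).any
      (fun word => PySem.Chars.isIn word.toList (text ++ tags)) then "Food"
  else if (["tech", "ai", "machine learning", "data", "software"] : List String).any
      (fun word => PySem.Chars.isIn word.toList (text ++ tags)) then "Technology"
  else if (["fitness", "workout", "gym", "health", "running"] : List String).any
      (fun word => PySem.Chars.isIn word.toList (text ++ tags)) then "Health & Fitness"
  else if (["music", "movie", "art", "concert"] : List String).any
      (fun word => PySem.Chars.isIn word.toList (text ++ tags)) then "Entertainment"
  else "General"

-- ===== PORT B =====
-- the flat KEYWORD_RANK table of Source B (keywords as List Char)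
def pvKeywordRanks : List (List Char × Nat) :=
  [("travel".toList, 0), ("trip".toList, 0), ("explore".toList, 0), ("vacation".toList, 0),
   ("tokyo".toList, 0), ("paris".toList, 0),
   ("food".toList, 1), ("restaurant".toList, 1), ("cuisine".toList, 1), ("taste".toList, 1),
   ("meal".toList, 1),
   ("tech".toList, 2), ("ai".toList, 2), ("machine learning".toList, 2), ("data".toList, 2),
   ("software".toList, 2),
   ("fitness".toList, 3), ("workout".toList, 3), ("gym".toList, 3), ("health".toList, 3),
   ("running".toList, 3),
   ("music".toList, 4), ("movie".toList, 4), ("art".toList, 4), ("concert".toList, 4)]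

def pvNames : List String :=
  ["Travel", "Food", "Technology", "Health & Fitness", "Entertainment", "General"]

-- the FIRST index of Source B: 'FIRST.setdefault(kw[0], []).append((kw, rank))' is
-- 'FIRST[kw[0]] = FIRST.get(kw[0], []) + [(kw, rank)]', i.e. Dict.modify; every
-- keyword in the table is nonempty, so kw[0] is its headD
def pvFirst : PySem.Dict Char (List (List Char × Nat)) :=
  pvKeywordRanks.foldl
    (fun d kr => d.modify (kr.1.headD ' ') [] (fun l => l ++ [kr])) PySem.Dict.empty

-- inner loop of Source B: 'for kw, rank in FIRST.get(h[i], ()): if rank < best and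
-- h.startswith(kw, i)'; h[i] with 0 ≤ i < len(h) is h.getD i, and
-- h.startswith(kw, i) is kw.isPrefixOf (h.drop i)
def pvScanBucket (h : List Char) (i : Nat) (best : Nat) : Nat :=
  (pvFirst.getD (h.getD i ' ') []).foldl
    (fun b kr => if kr.2 < b ∧ kr.1.isPrefixOf (h.drop i) then kr.2 else b) best

-- outer loop of Source B: 'for i in range(len(h)): if best == 0: break; …'
def pvScanLoop (h : List Char) : Nat → List Nat → Nat
  | best, [] => best
  | best, i :: rest => if best = 0 then best else pvScanLoop h (pvScanBucket h i best) rest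

def pvScanPositions (h : List Char) : Nat := pvScanLoop h 5 (List.range h.length)

def classify_post_alt (content : Option String) (hashtags : Option (List String)) : String :=
  let h := PySem.Chars.lower (content.getD "").toList
    ++ PySem.Chars.lower (PySem.Str.join " " (hashtags.getD [])).toList
  (PySem.List.pyGet? pvNames ((pvScanPositions h : Nat) : Int)).getD "General"

-- ===== PRECONDITION & SPEC =====
def Spec_classify_post (content : Option String) (hashtags : Option (List String)) (out : String) : Prop := out = classify_post_alt content hashtags
instance (content : Option String) (hashtags : Option (List String)) (out : String) : Decidable (Spec_classify_post content hashtags out) := by unfold Spec_classify_post; infer_instance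

-- ===== CLAIM (what is proved, stated in full; the proofs are below) =====
def Claim_equal_classify_post : Prop := ∀ (content : Option String) (hashtags : Option (List String)), Dom_classify_post content hashtags → Spec_classify_post content hashtags (classify_post content hashtags)

-- ===== LEMMAS AND PROOFS =====

-- rank r is matched somewhere in h (the property A's r-th branch tests)
def pvMatched (h : List Char) (r : Nat) : Prop :=
  ∃ kr ∈ pvKeywordRanks, kr.2 = r ∧ PySem.Chars.isIn kr.1 h = true

-- generic min-fold facts about the inner loop shape
theorem pvMinfold_le (L : List (List Char × Nat)) (p : List Char → Bool) (b : Nat) :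
    L.foldl (fun b kr => if kr.2 < b ∧ p kr.1 then kr.2 else b) b ≤ b := by
  induction L generalizing b with
  | nil => simp
  | cons kr L ih =>
      simp only [List.foldl_cons]
      split_ifs with hc
      · exact le_trans (ih _) (le_of_lt hc.1)
      · exact ih b

theorem pvMinfold_le_of (L : List (List Char × Nat)) (p : List Char → Bool) (b : Nat)
    {kr : List Char × Nat} (hm : kr ∈ L) (hp : p kr.1 = true) :
    L.foldl (fun b kr => if kr.2 < b ∧ p kr.1 then kr.2 else b) b ≤ kr.2 := by
  induction L generalizing b with
  | nil => cases hm
  | cons x L ih =>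
      simp only [List.foldl_cons]
      rcases List.mem_cons.mp hm with h | h
      · subst h
        split_ifs with hc
        · exact pvMinfold_le L p kr.2
        · rcases Nat.lt_or_ge kr.2 b with hlt | hge
          · exact absurd ⟨hlt, hp⟩ hc
          · exact le_trans (pvMinfold_le L p b) hge
      · exact ih _ h

theorem pvMinfold_attain (L : List (List Char × Nat)) (p : List Char → Bool) (b : Nat) :
    L.foldl (fun b kr => if kr.2 < b ∧ p kr.1 then kr.2 else b) b = b ∨
      ∃ kr ∈ L, p kr.1 = true ∧
        kr.2 = L.foldl (fun b kr => if kr.2 < b ∧ p kr.1 then kr.2 else b) b := by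
  induction L generalizing b with
  | nil => exact Or.inl rfl
  | cons x L ih =>
      simp only [List.foldl_cons]
      split_ifs with hc
      · rcases ih x.2 with h | ⟨kr, hm, hp, he⟩
        · exact Or.inr ⟨x, List.mem_cons_self .., hc.2, h.symm⟩
        · exact Or.inr ⟨kr, List.mem_cons_of_mem _ hm, hp, he⟩
      · rcases ih b with h | ⟨kr, hm, hp, he⟩
        · exact Or.inl h
        · exact Or.inr ⟨kr, List.mem_cons_of_mem _ hm, hp, he⟩

-- the three facts, specialised to the inner (bucket) loop
theorem pvScanBucket_le (h : List Char) (i b : Nat) : pvScanBucket h i b ≤ b := by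
  unfold pvScanBucket
  exact pvMinfold_le _ (fun w => w.isPrefixOf (h.drop i)) b

theorem pvScanBucket_le_of (h : List Char) (i b : Nat) {kr : List Char × Nat}
    (hm : kr ∈ pvFirst.getD (h.getD i ' ') []) (hp : kr.1.isPrefixOf (h.drop i) = true) :
    pvScanBucket h i b ≤ kr.2 := by
  unfold pvScanBucket
  exact pvMinfold_le_of _ (fun w => w.isPrefixOf (h.drop i)) b hm hp

theorem pvScanBucket_attain (h : List Char) (i b : Nat) :
    pvScanBucket h i b = b ∨
      ∃ kr ∈ pvFirst.getD (h.getD i ' ') [], kr.1.isPrefixOf (h.drop i) = true ∧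
        kr.2 = pvScanBucket h i b := by
  unfold pvScanBucket
  exact pvMinfold_attain _ (fun w => w.isPrefixOf (h.drop i)) b

-- the FIRST index holds, under c, exactly the table entries whose keyword starts with c
theorem pvBucket_eq (c : Char) :
    pvFirst.getD c [] = pvKeywordRanks.filter (fun kr => kr.1.headD ' ' == c) := by
  unfold pvFirst
  have hmap : (pvKeywordRanks.map (fun kr => ((kr.1.headD ' ' : Char), kr))).foldl
      (fun (d : PySem.Dict Char (List (List Char × Nat))) p => d.modify p.1 [] (fun l => l ++ [p.2]))
      PySem.Dict.empty
      = pvKeywordRanks.foldl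
        (fun d kr => d.modify (kr.1.headD ' ') [] (fun l => l ++ [kr])) PySem.Dict.empty := by
    rw [List.foldl_map]
  rw [← hmap, PySem.Dict.getD_foldl_modify_append]
  simp [List.filter_map, Function.comp_def]

theorem pvKR_ne_nil : ∀ kr ∈ pvKeywordRanks, kr.1 ≠ [] := by decide

-- completeness of the index: a keyword matching at position i < len h is in h[i]'s bucket
theorem pvMem_bucket (h : List Char) {i : Nat} {kr : List Char × Nat}
    (hm : kr ∈ pvKeywordRanks) (_hi : i < h.length)
    (hp : kr.1.isPrefixOf (h.drop i) = true) :
    kr ∈ pvFirst.getD (h.getD i ' ') [] := by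
  rw [pvBucket_eq]
  refine List.mem_filter.mpr ⟨hm, ?_⟩
  obtain ⟨c0, t, hc⟩ : ∃ c0 t, kr.1 = c0 :: t := by
    cases he : kr.1 with
    | nil => exact absurd he (pvKR_ne_nil kr hm)
    | cons c0 t => exact ⟨c0, t, rfl⟩
  have hpre := List.isPrefixOf_iff_prefix.mp hp
  rw [hc] at hpre
  have hhead : (h.drop i).head? = some c0 := by
    rcases hpre with ⟨s, hs⟩
    rw [← hs]; rfl
  have hget : h.getD i ' ' = c0 := by
    rw [List.getD_eq_getElem?_getD, ← List.head?_drop, hhead]; rfl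
  rw [hc, hget]; simp

-- soundness of the index: every bucket entry is a table entry
theorem pvBucket_sub (c : Char) {kr : List Char × Nat}
    (hm : kr ∈ pvFirst.getD c []) : kr ∈ pvKeywordRanks := by
  rw [pvBucket_eq] at hm
  exact (List.mem_filter.mp hm).1

-- outer-loop facts, over an arbitrary list of positions
theorem pvScanLoop_le (h : List Char) (J : List Nat) (b : Nat) :
    pvScanLoop h b J ≤ b := by
  induction J generalizing b with
  | nil => simp [pvScanLoop]
  | cons i J ih =>
      simp only [pvScanLoop]
      split_ifs with hz
      · exact le_refl b
      · exact le_trans (ih _) (pvScanBucket_le h i b)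

theorem pvScanLoop_le_of (h : List Char) (J : List Nat) (b : Nat)
    {i : Nat} {kr : List Char × Nat} (hi : i ∈ J)
    (hm : kr ∈ pvFirst.getD (h.getD i ' ') [])
    (hp : kr.1.isPrefixOf (h.drop i) = true) :
    pvScanLoop h b J ≤ kr.2 := by
  induction J generalizing b with
  | nil => cases hi
  | cons j J ih =>
      simp only [pvScanLoop]
      split_ifs with hz
      · omega
      · rcases List.mem_cons.mp hi with rfl | hji
        · exact le_trans (pvScanLoop_le h J _) (pvScanBucket_le_of h i b hm hp)
        · exact ih _ hji

theorem pvScanLoop_attain (h : List Char) (J : List Nat) (b : Nat) :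
    pvScanLoop h b J = b ∨
      ∃ i ∈ J, ∃ kr ∈ pvFirst.getD (h.getD i ' ') [],
        kr.1.isPrefixOf (h.drop i) = true ∧ kr.2 = pvScanLoop h b J := by
  induction J generalizing b with
  | nil => exact Or.inl rfl
  | cons j J ih =>
      simp only [pvScanLoop]
      split_ifs with hz
      · exact Or.inl rfl
      · rcases ih (pvScanBucket h j b) with he | ⟨i, hiJ, kr, hm, hp, he⟩
        · rcases pvScanBucket_attain h j b with h1 | ⟨kr, hm, hp, h1⟩
          · exact Or.inl (he.trans h1)
          · exact Or.inr ⟨j, List.mem_cons_self .., kr, hm, hp, h1.trans he.symm⟩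
        · exact Or.inr ⟨i, List.mem_cons_of_mem _ hiJ, kr, hm, hp, he⟩

-- characterization of the scan result
theorem pvScan_le_of_matched (h : List Char) {r : Nat} (hm : pvMatched h r) :
    pvScanPositions h ≤ r := by
  rcases hm with ⟨kr, hkr, hr, hin⟩
  rcases (PySem.Chars.exists_prefix_drop_iff_isIn (sub := kr.1) (s := h)).mpr hin with ⟨j, hj⟩
  have hjlt : j < h.length := by
    by_contra hge
    rw [List.drop_eq_nil_of_le (by omega)] at hj
    exact pvKR_ne_nil kr hkr (List.prefix_nil.mp hj)
  have hp : kr.1.isPrefixOf (h.drop j) = true := List.isPrefixOf_iff_prefix.mpr hj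
  exact hr ▸ pvScanLoop_le_of h _ 5 (List.mem_range.mpr hjlt) (pvMem_bucket h hkr hjlt hp) hp

theorem pvScan_attain (h : List Char) :
    pvScanPositions h = 5 ∨ pvMatched h (pvScanPositions h) := by
  rcases pvScanLoop_attain h (List.range h.length) 5 with he | ⟨i, _, kr, hm, hp, he⟩
  · exact Or.inl he
  · refine Or.inr ⟨kr, pvBucket_sub _ hm, he, ?_⟩
    exact (PySem.Chars.exists_prefix_drop_iff_isIn (sub := kr.1) (s := h)).mp
      ⟨i, List.isPrefixOf_iff_prefix.mp hp⟩

theorem pvScan_le_five (h : List Char) : pvScanPositions h ≤ 5 :=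
  pvScanLoop_le h _ 5

-- A's r-th branch condition equals pvMatched h r, for each r
theorem pvMatched_zero (h : List Char) :
    pvMatched h 0 ↔ ((["travel", "trip", "explore", "vacation", "tokyo", "paris"] : List String).any
      (fun word => PySem.Chars.isIn word.toList h)) = true := by
  simp [pvMatched, pvKeywordRanks]

theorem pvMatched_one (h : List Char) :
    pvMatched h 1 ↔ ((["food", "restaurant", "cuisine", "taste", "meal"] : List String).any
      (fun word => PySem.Chars.isIn word.toList h)) = true := by
  simp [pvMatched, pvKeywordRanks]

theorem pvMatched_two (h : List Char) :
    pvMatched h 2 ↔ ((["tech", "ai", "machine learning", "data", "software"] : List String).any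
      (fun word => PySem.Chars.isIn word.toList h)) = true := by
  simp [pvMatched, pvKeywordRanks]

theorem pvMatched_three (h : List Char) :
    pvMatched h 3 ↔ ((["fitness", "workout", "gym", "health", "running"] : List String).any
      (fun word => PySem.Chars.isIn word.toList h)) = true := by
  simp [pvMatched, pvKeywordRanks]

theorem pvMatched_four (h : List Char) :
    pvMatched h 4 ↔ ((["music", "movie", "art", "concert"] : List String).any
      (fun word => PySem.Chars.isIn word.toList h)) = true := by
  simp [pvMatched, pvKeywordRanks]

theorem pvMatched_lt_five (h : List Char) {r : Nat} (hm : pvMatched h r) : r < 5 := by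
  rcases hm with ⟨kr, hkr, hr, _⟩
  subst hr
  fin_cases hkr <;> simp

theorem pvLookup (b : Nat) (hb : b ≤ 5) :
    (PySem.List.pyGet? pvNames ((b : Nat) : Int)).getD "General" =
      pvNames.getD b "General" := by
  interval_cases b <;> rfl

-- the whole equivalence, over an abstract haystack
theorem pvMain (h : List Char) :
    (if (["travel", "trip", "explore", "vacation", "tokyo", "paris"] : List String).any
        (fun word => PySem.Chars.isIn word.toList h) then "Travel"
     else if (["food", "restaurant", "cuisine", "taste", "meal"] : List String).any
        (fun word => PySem.Chars.isIn word.toList h) then "Food"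
     else if (["tech", "ai", "machine learning", "data", "software"] : List String).any
        (fun word => PySem.Chars.isIn word.toList h) then "Technology"
     else if (["fitness", "workout", "gym", "health", "running"] : List String).any
        (fun word => PySem.Chars.isIn word.toList h) then "Health & Fitness"
     else if (["music", "movie", "art", "concert"] : List String).any
        (fun word => PySem.Chars.isIn word.toList h) then "Entertainment"
     else "General")
    = (PySem.List.pyGet? pvNames ((pvScanPositions h : Nat) : Int)).getD "General" := by
  rw [pvLookup _ (pvScan_le_five h)]
  have hle5 := pvScan_le_five h
  have hAtt := pvScan_attain h
  split_ifs with h0 h1 h2 h3 h4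
  · have hb : pvScanPositions h = 0 :=
      Nat.le_zero.mp (pvScan_le_of_matched h ((pvMatched_zero h).mpr h0))
    rw [hb]; rfl
  · have hle := pvScan_le_of_matched h ((pvMatched_one h).mpr h1)
    have hne : pvScanPositions h ≠ 0 := by
      intro he
      rcases hAtt with h5 | hm
      · omega
      · exact h0 ((pvMatched_zero h).mp (he ▸ hm))
    have hb : pvScanPositions h = 1 := by omega
    rw [hb]; rfl
  · have hle := pvScan_le_of_matched h ((pvMatched_two h).mpr h2)
    have hne0 : pvScanPositions h ≠ 0 := by
      intro he
      rcases hAtt with h5 | hm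
      · omega
      · exact h0 ((pvMatched_zero h).mp (he ▸ hm))
    have hne1 : pvScanPositions h ≠ 1 := by
      intro he
      rcases hAtt with h5 | hm
      · omega
      · exact h1 ((pvMatched_one h).mp (he ▸ hm))
    have hb : pvScanPositions h = 2 := by omega
    rw [hb]; rfl
  · have hle := pvScan_le_of_matched h ((pvMatched_three h).mpr h3)
    have hne0 : pvScanPositions h ≠ 0 := by
      intro he
      rcases hAtt with h5 | hm
      · omega
      · exact h0 ((pvMatched_zero h).mp (he ▸ hm))
    have hne1 : pvScanPositions h ≠ 1 := by
      intro he
      rcases hAtt with h5 | hm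
      · omega
      · exact h1 ((pvMatched_one h).mp (he ▸ hm))
    have hne2 : pvScanPositions h ≠ 2 := by
      intro he
      rcases hAtt with h5 | hm
      · omega
      · exact h2 ((pvMatched_two h).mp (he ▸ hm))
    have hb : pvScanPositions h = 3 := by omega
    rw [hb]; rfl
  · have hle := pvScan_le_of_matched h ((pvMatched_four h).mpr h4)
    have hne0 : pvScanPositions h ≠ 0 := by
      intro he
      rcases hAtt with h5 | hm
      · omega
      · exact h0 ((pvMatched_zero h).mp (he ▸ hm))
    have hne1 : pvScanPositions h ≠ 1 := by
      intro he
      rcases hAtt with h5 | hm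
      · omega
      · exact h1 ((pvMatched_one h).mp (he ▸ hm))
    have hne2 : pvScanPositions h ≠ 2 := by
      intro he
      rcases hAtt with h5 | hm
      · omega
      · exact h2 ((pvMatched_two h).mp (he ▸ hm))
    have hne3 : pvScanPositions h ≠ 3 := by
      intro he
      rcases hAtt with h5 | hm
      · omega
      · exact h3 ((pvMatched_three h).mp (he ▸ hm))
    have hb : pvScanPositions h = 4 := by omega
    rw [hb]; rfl
  · have hb : pvScanPositions h = 5 := by
      rcases hAtt with h5 | hm
      · exact h5
      · have hlt := pvMatched_lt_five h hm
        exfalso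
        have : pvScanPositions h = 0 ∨ pvScanPositions h = 1 ∨ pvScanPositions h = 2 ∨
            pvScanPositions h = 3 ∨ pvScanPositions h = 4 := by omega
        rcases this with he | he | he | he | he
        · exact h0 ((pvMatched_zero h).mp (he ▸ hm))
        · exact h1 ((pvMatched_one h).mp (he ▸ hm))
        · exact h2 ((pvMatched_two h).mp (he ▸ hm))
        · exact h3 ((pvMatched_three h).mp (he ▸ hm))
        · exact h4 ((pvMatched_four h).mp (he ▸ hm))
    rw [hb]; rfl

-- ===== VERDICT (by name: the statement is the Claim_ definition above) =====
theorem classify_post_spec : Claim_equal_classify_post := by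
  intro content hashtags _
  show classify_post content hashtags = classify_post_alt content hashtags
  unfold classify_post classify_post_alt
  exact pvMain _
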